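-- pv_equiv track=rewrite | github.com/nastyh/LeetCode | Basic Data Structures/2070_most_beautiful_item_for_each_query.py | maximumBeauty_pointers
-- ===== SOURCE A (Python) =====
-- from typing import List
--
-- def maximumBeauty_pointers(items: List[List[int]], queries: List[int]) -> List[int]:
--     """
--     O(nlogn)
--     O(n + q)
--     Using the two pointers (i for queries and j for items), iterate through the sorted queries.
--     For each query, check whether the current item's price is less than or equal to the query.
--     If so, make updates
--     If the current item's price is greater than the query price or if all items have been processed, just move to the next query by incrementing i.
--     Store the maximum beauty found for each query price in a dictionary.
--     """
--     items.sort(key=lambda x: x[0])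
--     d = {}
--     # track of the maximum beauty, and indices for items and queries
--     max_b, item_ix, query_ix = 0, 0, 0
--     sorted_q = sorted(queries)
--     while query_ix < len(sorted_q):
--         curr_q = sorted_q[query_ix]
--         # Update the maximum beauty as long as there are items that can be bought within current_query price
--         while item_ix < len(items) and curr_q >= items[item_ix][0]:
--             max_b = max(max_b, items[item_ix][1])
--             item_ix += 1
--         # maximum beauty for the current query price
--         d[curr_q] = max_b
--         query_ix += 1
--
--     return [d[query] for query in queries]
-- ===== SOURCE B (Python) =====
-- from typing import List
--
-- def maximumBeauty_pointers(items: List[List[int]], queries: List[int]) -> List[int]: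
--     # Same in-place sort of items as the original (the caller can observe it).
--     items.sort(key=lambda x: x[0])
--     prices = [it[0] for it in items]
--     # prefix maxima of beauty (never below 0)
--     pmax = []
--     best = 0
--     for it in items:
--         if it[1] > best:
--             best = it[1]
--         pmax.append(best)
--     # answer each query independently with a hand-rolled bisect_right on prices
--     res = []
--     for q in queries:
--         lo, hi = 0, len(prices)
--         while lo < hi:
--             mid = (lo + hi) // 2
--             if q < prices[mid]:
--                 hi = mid
--             else:
--                 lo = mid + 1
--         res.append(pmax[lo - 1] if lo else 0)
--     return res
-- ===== Notes on version B (the rewrite author's own statement) =====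
-- stated objective: alternative
-- what changed: Replaces the coupled two-pointer sweep over sorted queries with a running max and a result dictionary by a prefix-maximum array over the price-sorted items plus an independent hand-rolled bisect_right per query; queries are never sorted and no dict is built.
-- outside the precondition, e.g. on maximumBeauty_pointers([[5]], [1]): A returns [0], B raises IndexError
import Mathlib
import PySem

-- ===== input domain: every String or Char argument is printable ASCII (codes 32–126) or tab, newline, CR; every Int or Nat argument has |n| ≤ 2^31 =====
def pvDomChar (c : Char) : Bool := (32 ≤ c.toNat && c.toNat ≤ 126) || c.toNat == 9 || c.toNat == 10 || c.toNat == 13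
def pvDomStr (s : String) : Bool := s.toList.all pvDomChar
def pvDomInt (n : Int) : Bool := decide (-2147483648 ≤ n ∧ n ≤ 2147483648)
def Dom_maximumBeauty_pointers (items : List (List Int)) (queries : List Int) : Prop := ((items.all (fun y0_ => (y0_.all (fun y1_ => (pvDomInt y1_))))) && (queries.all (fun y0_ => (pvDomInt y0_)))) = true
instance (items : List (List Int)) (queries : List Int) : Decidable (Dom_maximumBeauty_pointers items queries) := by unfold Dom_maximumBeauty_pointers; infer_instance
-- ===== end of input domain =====

-- B replaces the two-pointer sweep over sorted queries by an independent per-query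
-- maximum (simpler, same return values; both sort `items` in place in Python).


-- ===== PORT A =====
-- it[0] / it[1]; Pre_ guarantees every item has at least two entries, so the default is never used
def pvFst (it : List Int) : Int := PySem.List.pyGetD it 0 0
def pvSnd (it : List Int) : Int := PySem.List.pyGetD it 1 0

-- inner while: consume items while curr_q >= items[item_ix][0], updating max_b
def pvInnerA (q : Int) : Int → List (List Int) → Int × List (List Int)
  | maxb, [] => (maxb, [])
  | maxb, it :: rest =>
    if pvFst it ≤ q then pvInnerA q (max maxb (pvSnd it)) rest
    else (maxb, it :: rest)

-- outer while over the sorted queries, filling the dict d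
def pvOuterA : List Int → Int → List (List Int) → PySem.Dict Int Int → PySem.Dict Int Int
  | [], _, _, d => d
  | q :: qs, maxb, rest, d =>
    let p := pvInnerA q maxb rest
    pvOuterA qs p.1 p.2 (d.insert q p.1)

def maximumBeauty_pointers (items : List (List Int)) (queries : List Int) : List Int :=
  let itemsSorted := PySem.List.sorted items (fun x => pvFst x) false
  let sortedQ := PySem.List.sorted queries (fun q => q) false
  let d := pvOuterA sortedQ 0 itemsSorted PySem.Dict.empty
  -- d[query]: every query is a key of d (sorted(queries) is a permutation of queries), so KeyError is impossible
  queries.map (fun q => ((d.get? q).getD 0))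

-- ===== PORT B =====
-- prefix-max pass: best = running max of it[1] (clamped below by 0), pmax collects it
def pvPmaxLoop : List (List Int) → Int → List Int → Int × List Int
  | [], best, pmax => (best, pmax)
  | it :: rest, best, pmax =>
    let best' := if pvSnd it > best then pvSnd it else best
    pvPmaxLoop rest best' (pmax ++ [best'])

-- the hand-rolled bisect_right while-loop; fuel bounds the iterations (the 'none'
-- branch is unreachable: (lo+hi)/2 < hi ≤ prices.length whenever it is read)
def pvBisect (prices : List Int) (q : Int) : Nat → Nat → Nat → Nat
  | 0, lo, _ => lo
  | fuel + 1, lo, hi =>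
    if lo < hi then
      match prices[(lo + hi) / 2]? with
      | some y => if q < y then pvBisect prices q fuel lo ((lo + hi) / 2)
                  else pvBisect prices q fuel ((lo + hi) / 2 + 1) hi
      | none => lo
    else lo

def maximumBeauty_pointers_alt (items : List (List Int)) (queries : List Int) : List Int :=
  let itemsSorted := PySem.List.sorted items (fun x => pvFst x) false
  let prices := itemsSorted.map (fun it => pvFst it)
  let pmax := (pvPmaxLoop itemsSorted 0 []).2
  queries.map (fun q =>
    let lo := pvBisect prices q prices.length 0 prices.length
    if lo ≠ 0 then PySem.List.pyGetD pmax ((lo : Int) - 1) 0 else 0)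

-- ===== PRECONDITION & SPEC =====
-- Pre_ excludes items with fewer than two entries: on such inputs the Python programs
-- raise IndexError (in the sort key, or reading it[1]) for some query values.
def Pre_maximumBeauty_pointers (items : List (List Int)) (queries : List Int) : Prop :=
  ∀ it ∈ items, 2 ≤ it.length
instance (items : List (List Int)) (queries : List Int) : Decidable (Pre_maximumBeauty_pointers items queries) := by unfold Pre_maximumBeauty_pointers; infer_instance

def pvWitness_maximumBeauty_pointers : List (List Int) × List Int := ([[3, 4], [1, 2]], [2, 0, 5])

def Spec_maximumBeauty_pointers (items : List (List Int)) (queries : List Int) (out : List Int) : Prop := out = maximumBeauty_pointers_alt items queries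
instance (items : List (List Int)) (queries : List Int) (out : List Int) : Decidable (Spec_maximumBeauty_pointers items queries out) := by unfold Spec_maximumBeauty_pointers; infer_instance

-- ===== CLAIM (what is proved, stated in full; the proofs are below) =====
def Claim_equal_maximumBeauty_pointers : Prop := ∀ (items : List (List Int)) (queries : List Int), Dom_maximumBeauty_pointers items queries → Pre_maximumBeauty_pointers items queries → Spec_maximumBeauty_pointers items queries (maximumBeauty_pointers items queries)

-- ===== LEMMAS AND PROOFS =====

-- the per-query answer both ports compute, over the price-sorted items
def pvBest (S : List (List Int)) (q : Int) : Int :=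
  ((S.filter (fun it => decide (pvFst it ≤ q))).map pvSnd).foldl max 0

lemma pvInnerA_spec (q : Int) (rest : List (List Int)) : ∀ maxb,
    pvInnerA q maxb rest =
      ((rest.takeWhile (fun it => decide (pvFst it ≤ q))).foldl (fun m it => max m (pvSnd it)) maxb,
       rest.dropWhile (fun it => decide (pvFst it ≤ q))) := by
  induction rest with
  | nil => intro maxb; simp [pvInnerA]
  | cons it rest ih =>
    intro maxb
    by_cases h : pvFst it ≤ q
    · simp [pvInnerA, h, ih]
    · simp [pvInnerA, h]

lemma takeWhile_eq_filter_of_sorted (q : Int) (l : List (List Int))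
    (hl : l.Pairwise (fun a b => pvFst a ≤ pvFst b)) :
    l.takeWhile (fun it => decide (pvFst it ≤ q)) = l.filter (fun it => decide (pvFst it ≤ q)) := by
  induction l with
  | nil => rfl
  | cons a l ih =>
    rcases List.pairwise_cons.mp hl with ⟨ha, hl'⟩
    by_cases h : pvFst a ≤ q
    · simp [h, ih hl']
    · simp only [List.takeWhile_cons, List.filter_cons, h, decide_false]
      rw [List.filter_eq_nil_iff.mpr]
      · simp
      · intro b hb
        simp only [decide_eq_true_eq]
        exact fun hbq => h (le_trans (ha b hb) hbq)

lemma pvOuterA_get (qs : List Int) : ∀ (done rest : List (List Int)) (d : PySem.Dict Int Int),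
    (done ++ rest).Pairwise (fun a b => pvFst a ≤ pvFst b) →
    (∀ q ∈ qs, ∀ it ∈ done, pvFst it ≤ q) →
    qs.Pairwise (· ≤ ·) →
    ∀ x, (pvOuterA qs (done.foldl (fun m it => max m (pvSnd it)) 0) rest d).get? x
        = if x ∈ qs then some (pvBest (done ++ rest) x) else d.get? x := by
  induction qs with
  | nil => intro done rest d _ _ _ x; simp [pvOuterA]
  | cons q qs ih =>
    intro done rest d hpair hq hqs x
    have hrest : rest.Pairwise (fun a b => pvFst a ≤ pvFst b) :=
      (List.pairwise_append.mp hpair).2.1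
    have hdone : ∀ it ∈ done, pvFst it ≤ q := hq q (List.mem_cons_self ..)
    rcases List.pairwise_cons.mp hqs with ⟨hqle, hqs'⟩
    have hp : ∀ it ∈ done, (fun it => decide (pvFst it ≤ q)) it = true :=
      fun it hit => decide_eq_true (hdone it hit)
    have hsplit : done ++ rest = (done ++ rest.takeWhile (fun it => decide (pvFst it ≤ q))) ++ rest.dropWhile (fun it => decide (pvFst it ≤ q)) := by
      rw [List.append_assoc, List.takeWhile_append_dropWhile]
    have hval : (rest.takeWhile (fun it => decide (pvFst it ≤ q))).foldl (fun m it => max m (pvSnd it))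
          (done.foldl (fun m it => max m (pvSnd it)) 0)
        = (done ++ rest.takeWhile (fun it => decide (pvFst it ≤ q))).foldl (fun m it => max m (pvSnd it)) 0 := by
      rw [List.foldl_append]
    have hbest : (done ++ rest.takeWhile (fun it => decide (pvFst it ≤ q))).foldl (fun m it => max m (pvSnd it)) 0
        = pvBest (done ++ rest) q := by
      unfold pvBest
      rw [List.foldl_map, List.filter_append, takeWhile_eq_filter_of_sorted q rest hrest,
        List.filter_eq_self.mpr hp]
    simp only [pvOuterA, pvInnerA_spec]
    rw [hval, hbest]
    have ihx := ih (done ++ rest.takeWhile (fun it => decide (pvFst it ≤ q))) (rest.dropWhile (fun it => decide (pvFst it ≤ q)))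
      ((d.insert q (pvBest (done ++ rest) q)))
      (by rw [← hsplit]; exact hpair)
      (by
        intro q' hq' it hit
        rcases List.mem_append.mp hit with h | h
        · exact hq q' (List.mem_cons_of_mem _ hq') it h
        · have h2 := List.mem_takeWhile_imp h
          exact le_trans (of_decide_eq_true h2) (hqle q' hq'))
      hqs' x
    rw [hbest] at ihx
    rw [ihx, ← hsplit]
    by_cases hx : x ∈ qs
    · simp [hx]
    · by_cases hxq : x = q
      · subst hxq; simp [hx, PySem.Dict.get?_insert_self]
      · simp [hx, hxq, PySem.Dict.get?_insert_of_ne _ _ hxq]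

-- the hand-written while loop is exactly PySem's bisect_right loop
lemma pvBisect_eq_bisectRightLoop (prices : List Int) (q : Int) (f lo hi : Nat) :
    pvBisect prices q f lo hi = PySem.List.bisectRightLoop prices q f lo hi := by
  induction f generalizing lo hi with
  | zero => rfl
  | succ f ih =>
    simp only [pvBisect, PySem.List.bisectRightLoop]
    split_ifs
    · rcases h : prices[(lo + hi) / 2]? with _ | y
      · simp
      · simp [ih]
    · rfl

-- the running prefix maxima that pvPmaxLoop accumulates
def pvRunning : List (List Int) → Int → List Int
  | [], _ => []
  | it :: rest, b => max b (pvSnd it) :: pvRunning rest (max b (pvSnd it))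

lemma pvIfMax (b v : Int) : (if v > b then v else b) = max b v := by
  split_ifs with h
  · exact (max_eq_right h.le).symm
  · exact (max_eq_left (not_lt.mp h)).symm

lemma pvPmaxLoop_snd (l : List (List Int)) : ∀ (b : Int) (acc : List Int),
    (pvPmaxLoop l b acc).2 = acc ++ pvRunning l b := by
  induction l with
  | nil => intro b acc; simp [pvPmaxLoop, pvRunning]
  | cons it rest ih =>
    intro b acc
    simp only [pvPmaxLoop, pvRunning, pvIfMax, ih, List.append_assoc, List.singleton_append]

lemma length_pvRunning (l : List (List Int)) : ∀ b, (pvRunning l b).length = l.length := by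
  induction l with
  | nil => intro b; rfl
  | cons it rest ih => intro b; simp [pvRunning, ih]

lemma getElem_pvRunning (l : List (List Int)) : ∀ (b : Int) (j : Nat) (hj : j < l.length),
    (pvRunning l b)[j]'(by rw [length_pvRunning]; exact hj)
      = ((l.take (j + 1)).map pvSnd).foldl max b := by
  induction l with
  | nil => intro b j hj; simp at hj
  | cons it rest ih =>
    intro b j hj
    cases j with
    | zero => simp [pvRunning]
    | succ j =>
      simp only [pvRunning, List.getElem_cons_succ, List.take_succ_cons, List.map_cons,
        List.foldl_cons]
      exact ih (max b (pvSnd it)) j (by simpa using hj)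

-- a predicate that holds on exactly the first k positions selects the k-prefix
lemma pvFilter_eq_take {α : Type} (p : α → Bool) (l : List α) : ∀ (k : Nat), k ≤ l.length →
    (∀ (j : Nat) (hj : j < l.length), j < k → p l[j]) →
    (∀ (j : Nat) (hj : j < l.length), k ≤ j → p l[j] = false) →
    l.filter p = l.take k := by
  induction l with
  | nil => intro k hk _ _; simp_all
  | cons a l ih =>
    intro k hk h1 h2
    cases k with
    | zero =>
      rw [List.take_zero, List.filter_eq_nil_iff]
      intro x hx
      rcases List.mem_iff_getElem.mp hx with ⟨j, hj, rfl⟩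
      simp [h2 j hj (Nat.zero_le j)]
    | succ k =>
      have hpa : p a = true := by simpa using h1 0 (by simp) (Nat.succ_pos k)
      rw [List.take_succ_cons, List.filter_cons_of_pos hpa]
      rw [ih k (by simpa using hk)
        (fun j hj hjk => h1 (j + 1) (by simpa using hj) (by omega))
        (fun j hj hjk => h2 (j + 1) (by simpa using hj) (by omega))]

-- B's per-query computation over the price-sorted items equals pvBest
lemma pvAltEntry_eq_pvBest (S : List (List Int)) (q : Int) (prices : List Int) (lo : Nat)
    (hpr : prices = S.map (fun it => pvFst it))
    (hlodef : lo = pvBisect prices q prices.length 0 prices.length)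
    (hs : S.Pairwise (fun a b => pvFst a ≤ pvFst b)) :
    (if lo ≠ 0 then PySem.List.pyGetD ((pvPmaxLoop S 0 []).2) ((lo : Int) - 1) 0 else 0)
      = pvBest S q := by
  subst hpr
  have hps : (S.map (fun it => pvFst it)).Pairwise (· ≤ ·) := List.pairwise_map.mpr hs
  set prices := S.map (fun it => pvFst it) with hprdef
  have hlo : lo = PySem.List.bisectRight prices q := hlodef.trans (pvBisect_eq_bisectRightLoop ..)
  subst hlo
  rcases PySem.List.bisectRight_spec prices q hps with ⟨hk1, hk2, hk3⟩
  have hlen : prices.length = S.length := List.length_map ..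
  have hkS : PySem.List.bisectRight prices q ≤ S.length := hlen ▸ hk1
  have htake : S.filter (fun it => decide (pvFst it ≤ q))
      = S.take (PySem.List.bisectRight prices q) := by
    apply pvFilter_eq_take _ _ _ hkS
    · intro j hj hjk
      have := hk2 j (by omega) hjk
      simp only [prices, List.getElem_map] at this
      simpa using this
    · intro j hj hjk
      have := hk3 j (by omega) hjk
      simp only [prices, List.getElem_map] at this
      simpa using this
  by_cases h0 : PySem.List.bisectRight prices q = 0
  · simp [h0, pvBest, htake]
  · have hk1' : PySem.List.bisectRight prices q - 1 < S.length := by omega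
    have hcast : ((PySem.List.bisectRight prices q : Int) - 1)
        = ((PySem.List.bisectRight prices q - 1 : Nat) : Int) := by omega
    rw [if_pos h0, pvPmaxLoop_snd, List.nil_append, hcast, PySem.List.pyGetD_natCast,
      List.getD_eq_getElem?_getD, List.getElem?_eq_getElem
        (by rw [length_pvRunning]; exact hk1'), Option.getD_some,
      getElem_pvRunning S 0 _ hk1', Nat.sub_add_cancel (Nat.one_le_iff_ne_zero.mpr h0)]
    rw [pvBest, htake]

-- ===== VERDICT (by name: the statement is the Claim_ definition above) =====
theorem maximumBeauty_pointers_spec : Claim_equal_maximumBeauty_pointers := by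
  intro items queries _ _
  unfold Spec_maximumBeauty_pointers maximumBeauty_pointers maximumBeauty_pointers_alt
  apply List.map_congr_left
  intro q hq
  have hmem : q ∈ PySem.List.sorted queries (fun q => q) false :=
    (PySem.List.mem_sorted queries (fun q => q) false q).mpr hq
  have hpair : (PySem.List.sorted items (fun x => pvFst x) false).Pairwise
      (fun a b => pvFst a ≤ pvFst b) := PySem.List.sorted_pairwise items (fun x => pvFst x)
  have h := pvOuterA_get (PySem.List.sorted queries (fun q => q) false)
    [] (PySem.List.sorted items (fun x => pvFst x) false) PySem.Dict.empty
    (by simpa using hpair)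
    (by intro _ _ it hit; simp at hit)
    (PySem.List.sorted_pairwise queries (fun q => q))
    q
  simp only [List.foldl_nil, List.nil_append] at h
  rw [h, if_pos hmem, Option.getD_some]
  exact (pvAltEntry_eq_pvBest (PySem.List.sorted items (fun x => pvFst x) false) q _ _
    rfl rfl hpair).symm
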